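-- pv_equiv track=rewrite | github.com/Spotify-Song-Suggester-Unit-4/Spotify-Song-Suggester | data_manipulation.py | clean_genre
-- ===== SOURCE A (Python) =====
-- def clean_genre(genre):
--     '''Cleans up a genre's name for simplification'''
--     # list of terms to remove
--     removal_list = [
--         "era",
--         "vintage",
--         "modern",
--         "classic",
--     ]
--
--     # list of terms to automatically simplify to
--     simplify_list = [
--         "classical",
--         "metal",
--         "rock",
--         "pop",
--         "country",
--         "opera",
--         "jazz",
--         "folk",
--         "dance",
--         "soundtrack",
--         "modernism",
--     ]
--
--     genre_list = genre.split(" ")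
--
--     # return already simple genre names
--     if len(genre_list) == 1:
--         return genre
--
--     # Start with the simplifications
--     for word in genre_list:
--         if word in simplify_list:
--             return word
--
--     new_genre_list = []
--
--     for word in genre_list:
--         if word not in removal_list:
--             new_genre_list.append(word)
--
--     new_genre = " ".join(new_genre_list).rstrip()
--
--     return new_genre
-- ===== SOURCE B (Python) =====
-- def clean_genre(genre):
--     '''Cleans up a genre's name for simplification'''
--     removal_list = ("era", "vintage", "modern", "classic")
--     simplify_list = (
--         "classical", "metal", "rock", "pop", "country", "opera",
--         "jazz", "folk", "dance", "soundtrack", "modernism",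
--     )
--
--     genre_list = genre.split(" ")
--
--     # return already simple genre names
--     if len(genre_list) == 1:
--         return genre
--
--     # single pass: return the first simplification hit, otherwise collect kept words
--     kept = []
--     for word in genre_list:
--         if word in simplify_list:
--             return word
--         if word not in removal_list:
--             kept.append(word)
--
--     return " ".join(kept).rstrip()
-- ===== Notes on version B (the rewrite author's own statement) =====
-- stated objective: simpler
-- what changed: Replaces A's two separate traversals (a scan for a simplify hit, then a filter pass building new_genre_list) with a single pass that returns the first simplify match or accumulates kept words as it goes.
import Mathlib
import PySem

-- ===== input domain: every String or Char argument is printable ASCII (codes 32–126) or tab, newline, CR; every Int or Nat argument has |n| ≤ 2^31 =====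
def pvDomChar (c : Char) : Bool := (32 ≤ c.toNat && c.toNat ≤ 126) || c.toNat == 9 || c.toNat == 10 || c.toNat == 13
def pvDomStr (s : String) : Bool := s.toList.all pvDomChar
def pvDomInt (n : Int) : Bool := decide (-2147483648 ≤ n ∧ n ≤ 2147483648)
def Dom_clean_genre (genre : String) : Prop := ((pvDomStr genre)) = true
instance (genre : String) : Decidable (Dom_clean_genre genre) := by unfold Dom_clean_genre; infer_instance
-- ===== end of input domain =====

-- B folds A's two loops (simplify scan, then removal filter) into one pass; objective: simpler.

-- shared constant lists (module-level data in both Pythons)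
def removal_list : List String := ["era", "vintage", "modern", "classic"]

def simplify_list : List String :=
  ["classical", "metal", "rock", "pop", "country", "opera",
   "jazz", "folk", "dance", "soundtrack", "modernism"]

-- ===== PORT A =====
-- genre.split(" "): sep is the nonempty literal " ", so split? is always some
def clean_genre (genre : String) : String :=
  let genre_list := (PySem.Str.split? genre " ").getD []
  if genre_list.length = 1 then genre
  else
    match genre_list.find? (fun w => simplify_list.contains w) with
    | some w => w
    | none =>
      let new_genre_list :=
        genre_list.foldl
          (fun acc w => if removal_list.contains w = false then acc ++ [w] else acc) []
      PySem.Str.rstrip (PySem.Str.join " " new_genre_list)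

-- ===== PORT B =====
def cg_go : List String → List String → String
  | [], kept => PySem.Str.rstrip (PySem.Str.join " " kept)
  | w :: ws, kept =>
    if simplify_list.contains w then w
    else cg_go ws (if removal_list.contains w = false then kept ++ [w] else kept)

def clean_genre_alt (genre : String) : String :=
  let genre_list := (PySem.Str.split? genre " ").getD []
  if genre_list.length = 1 then genre
  else cg_go genre_list []

-- ===== PRECONDITION & SPEC =====
def Spec_clean_genre (genre : String) (out : String) : Prop := out = clean_genre_alt genre
instance (genre : String) (out : String) : Decidable (Spec_clean_genre genre out) := by unfold Spec_clean_genre; infer_instance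

-- ===== CLAIM (what is proved, stated in full; the proofs are below) =====
def Claim_equal_clean_genre : Prop := ∀ (genre : String), Dom_clean_genre genre → Spec_clean_genre genre (clean_genre genre)

-- ===== LEMMAS AND PROOFS =====
theorem cg_go_eq (l : List String) : ∀ (kept : List String),
    cg_go l kept =
      match l.find? (fun w => simplify_list.contains w) with
      | some w => w
      | none =>
        PySem.Str.rstrip (PySem.Str.join " "
          (l.foldl (fun acc w => if removal_list.contains w = false then acc ++ [w] else acc) kept)) := by
  induction l with
  | nil => intro kept; simp [cg_go]
  | cons w ws ih =>
    intro kept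
    by_cases h : w ∈ simplify_list
    · simp [cg_go, List.find?, h]
    · simp only [cg_go, List.find?, List.foldl, List.contains_eq_mem, h]
      simpa [List.contains_eq_mem] using ih (if decide (w ∈ removal_list) = false then kept ++ [w] else kept)

-- ===== VERDICT (by name: the statement is the Claim_ definition above) =====
theorem clean_genre_spec : Claim_equal_clean_genre := by
  intro genre _
  unfold Spec_clean_genre clean_genre clean_genre_alt
  set gl := (PySem.Str.split? genre " ").getD [] with hgl
  by_cases h1 : gl.length = 1
  · simp [h1]
  · simp only [h1, if_false]
    exact (cg_go_eq gl []).symm
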